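-- pv_equiv track=rewrite | github.com/1t1n1/CTFs | CyberSci_Nationals_2025/jeopardy/rev/rigged_ballots_2/simple.py | subtract_0x19_from_string
-- ===== SOURCE A (Python) =====
-- def subtract_0x19_from_string(input_string):
--     result = ''
--     for char in input_string:
--         new_char_code = ord(char) - 0x19  # Subtract 25
--         # Ensure the new character code is valid
--         if new_char_code < 0:
--             new_char_code = ord(char)
--         result += chr(new_char_code)
--     return result
-- ===== SOURCE B (Python) =====
-- def subtract_0x19_from_string(input_string):
--     table = {ord(c): ord(c) - 0x19 for c in set(input_string) if ord(c) >= 0x19}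
--     return input_string.translate(table)
-- ===== Notes on version B (the rewrite author's own statement) =====
-- stated objective: idiomatic
-- what changed: B builds a translation table keyed by the input's distinct character codes (chars below 0x19 omitted so translate passes them through) and applies it in one bulk str.translate call, instead of A's per-character accumulation with string concatenation.
import Mathlib
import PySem

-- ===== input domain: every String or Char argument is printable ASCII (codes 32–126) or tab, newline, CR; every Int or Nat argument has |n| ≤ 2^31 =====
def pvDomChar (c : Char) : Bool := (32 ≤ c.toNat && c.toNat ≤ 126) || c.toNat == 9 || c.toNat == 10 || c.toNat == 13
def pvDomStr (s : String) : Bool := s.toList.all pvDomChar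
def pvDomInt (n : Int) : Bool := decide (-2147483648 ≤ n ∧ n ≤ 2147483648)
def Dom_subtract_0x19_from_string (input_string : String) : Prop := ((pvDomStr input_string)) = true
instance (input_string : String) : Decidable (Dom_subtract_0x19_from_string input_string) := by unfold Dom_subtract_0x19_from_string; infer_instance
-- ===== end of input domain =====

-- B replaces A's per-character string accumulation by a translation table over the
-- input's distinct character codes applied with str.translate (idiomatic; return value only).


-- ===== PORT A =====
-- result accumulated left-to-right, one char appended per iteration, as in A's loop
def subtract_0x19_from_string (input_string : String) : String :=
  String.mk (input_string.toList.foldl (fun result c =>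
    let new_char_code : Int := (c.toNat : Int) - 0x19
    let new_char_code : Int := if new_char_code < 0 then (c.toNat : Int) else new_char_code
    result ++ [Char.ofNat new_char_code.toNat]) [])

-- ===== PORT B =====
-- table = {ord(c): ord(c) - 0x19 for c in set(input_string) if ord(c) >= 0x19}; then translate:
-- each char is looked up by code, unmapped codes pass through (exact model of str.translate here)
def subtract_0x19_from_string_alt (input_string : String) : String :=
  let table : PySem.Dict Int Int :=
    (((PySem.Set.ofList input_string.toList).filter (fun c => 0x19 ≤ c.toNat)).foldl
      (fun d c => d.insert (c.toNat : Int) ((c.toNat : Int) - 0x19)) PySem.Dict.empty)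
  String.mk (input_string.toList.map (fun c =>
    match table.get? (c.toNat : Int) with
    | some v => Char.ofNat v.toNat
    | none => c))

-- ===== PRECONDITION & SPEC =====
def Spec_subtract_0x19_from_string (input_string : String) (out : String) : Prop := out = subtract_0x19_from_string_alt input_string
instance (input_string : String) (out : String) : Decidable (Spec_subtract_0x19_from_string input_string out) := by unfold Spec_subtract_0x19_from_string; infer_instance

-- ===== CLAIM (what is proved, stated in full; the proofs are below) =====
def Claim_equal_subtract_0x19_from_string : Prop := ∀ (input_string : String), Dom_subtract_0x19_from_string input_string → Spec_subtract_0x19_from_string input_string (subtract_0x19_from_string input_string)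

-- ===== LEMMAS AND PROOFS =====

-- A's loop is an appending fold: it equals the map of its per-char step
theorem pv_foldl_append_map (g : Char → Char) (L : List Char) (acc : List Char) :
    L.foldl (fun r c => r ++ [g c]) acc = acc ++ L.map g := by
  induction L generalizing acc with
  | nil => simp
  | cons c L ih => simp [List.foldl, ih]

-- lookup in the table-building fold: the value depends only on the key
theorem pv_get_table (M : List Char) (d : PySem.Dict Int Int) (k : Int) :
    (M.foldl (fun d c => d.insert (c.toNat : Int) ((c.toNat : Int) - 0x19)) d).get? k
      = if ∃ c ∈ M, (c.toNat : Int) = k then some (k - 0x19) else d.get? k := by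
  induction M generalizing d with
  | nil => simp
  | cons c M ih =>
    simp only [List.foldl]
    rw [ih]
    by_cases hM : ∃ c' ∈ M, ((c'.toNat : Int)) = k
    · have hex : ∃ c' ∈ c :: M, ((c'.toNat : Int)) = k :=
        ⟨hM.choose, List.mem_cons_of_mem _ hM.choose_spec.1, hM.choose_spec.2⟩
      rw [if_pos hM, if_pos hex]
    · rw [if_neg hM]
      by_cases hc : ((c.toNat : Int)) = k
      · have hex : ∃ c' ∈ c :: M, ((c'.toNat : Int)) = k := ⟨c, List.mem_cons_self, hc⟩
        rw [if_pos hex]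
        subst hc
        rw [PySem.Dict.get?_insert_self]
      · have hne : k ≠ ((c.toNat : Int)) := fun h => hc h.symm
        rw [PySem.Dict.get?_insert_of_ne _ _ hne]
        have hnex : ¬ ∃ c' ∈ c :: M, ((c'.toNat : Int)) = k := by
          rintro ⟨c', hm, hk⟩
          rcases List.mem_cons.mp hm with rfl | hm'
          · exact hc hk
          · exact hM ⟨c', hm', hk⟩
        rw [if_neg hnex]

-- ===== VERDICT (by name: the statement is the Claim_ definition above) =====
theorem subtract_0x19_from_string_spec : Claim_equal_subtract_0x19_from_string := by
  intro s hdom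
  unfold Spec_subtract_0x19_from_string subtract_0x19_from_string subtract_0x19_from_string_alt
  simp only []
  rw [pv_foldl_append_map]
  simp only [List.nil_append]
  congr 1
  apply List.map_congr_left
  intro c hc
  have hdc : pvDomChar c = true := by
    have := List.all_eq_true.mp hdom c hc
    exact this
  have hcv : c.toNat ≤ 126 := by
    simp [pvDomChar] at hdc
    omega
  rw [pv_get_table]
  by_cases h25 : (25 : Nat) ≤ c.toNat
  · have hex : ∃ c' ∈ (PySem.Set.ofList s.toList).filter (fun c => 0x19 ≤ c.toNat),
        ((c'.toNat : Int)) = (c.toNat : Int) := by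
      refine ⟨c, ?_, rfl⟩
      rw [List.mem_filter]
      exact ⟨(PySem.Set.mem_ofList _ _).mpr hc, by simpa using h25⟩
    rw [if_pos hex]
    simp only [if_neg (by omega : ¬ ((c.toNat : Int) - 0x19 < 0))]
  · have hnex : ¬ ∃ c' ∈ (PySem.Set.ofList s.toList).filter (fun c => 0x19 ≤ c.toNat),
        ((c'.toNat : Int)) = (c.toNat : Int) := by
      rintro ⟨c', hm, hk⟩
      rw [List.mem_filter] at hm
      have : c'.toNat = c.toNat := by exact_mod_cast hk
      exact h25 (this ▸ (by simpa using hm.2))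
    rw [if_neg hnex, PySem.Dict.get?_empty]
    simp only []
    rw [if_pos (by omega : ((c.toNat : Int) - 0x19 < 0))]
    have : ((c.toNat : Int)).toNat = c.toNat := by omega
    rw [this]
    exact Char.ofNat_toNat c
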